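-- pv_equiv track=rewrite | github.com/AlexBorodul/Python_Skillbox | buns/mod2/task8.py | begin
-- ===== SOURCE A (Python) =====
-- def begin(str):
--     let = str[-1]
--     count = 0
--     for i in range(0, len(str)):
--         if str[i] == let:
--             count += 1
--         else:
--             break
--     return count
-- ===== SOURCE B (Python) =====
-- def begin(str):
--     let = str[-1]
--     return len(str) - len(str.lstrip(let))
-- ===== Notes on version B (the rewrite author's own statement) =====
-- stated objective: faster
-- what changed: Replaces the explicit per-character index loop with a break by length arithmetic over str.lstrip(last char): the number of stripped characters is the length of the leading run equal to the last character, computed by a C-level builtin scan.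
import Mathlib
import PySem

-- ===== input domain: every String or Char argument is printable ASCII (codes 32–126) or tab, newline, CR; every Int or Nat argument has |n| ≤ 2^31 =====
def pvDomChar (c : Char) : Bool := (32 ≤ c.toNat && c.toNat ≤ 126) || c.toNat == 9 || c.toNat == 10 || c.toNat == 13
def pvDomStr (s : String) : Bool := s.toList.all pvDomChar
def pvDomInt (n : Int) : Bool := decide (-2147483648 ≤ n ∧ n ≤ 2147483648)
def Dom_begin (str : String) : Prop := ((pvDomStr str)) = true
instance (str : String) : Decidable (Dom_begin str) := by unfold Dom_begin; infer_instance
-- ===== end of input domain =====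

-- B replaces A's indexed loop-with-break by length arithmetic over lstrip(last char) (idiomatic).


-- ===== PORT A =====
-- the for-loop over range(0, len(str)) with break, carrying the running count
def beginLoopA (cs : List Char) (letc : Char) (count : Int) : Int :=
  match cs with
  | [] => count
  | c :: rest => if c = letc then beginLoopA rest letc (count + 1) else count

def begin (str : String) : Int :=
  match PySem.Str.pyGet? str (-1) with
  | none => 0   -- str[-1] raises IndexError on the empty string; excluded by Pre_begin
  | some letc => beginLoopA str.toList letc 0

-- ===== PORT B =====
-- len(str) - len(str.lstrip(let)); lstrip with a single-char argument drops the leading run of that char (ported by hand, exact)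
def begin_alt (str : String) : Int :=
  match PySem.Str.pyGet? str (-1) with
  | none => 0   -- str[-1] raises IndexError on the empty string; excluded by Pre_begin
  | some letc => (str.toList.length : Int) - ((str.toList.dropWhile (· == letc)).length : Int)

-- ===== PRECONDITION & SPEC =====
-- A (and B) raise IndexError at str[-1] on the empty string; Pre_ excludes exactly that input.
def Pre_begin (str : String) : Prop := str ≠ ""
instance (str : String) : Decidable (Pre_begin str) := by unfold Pre_begin; infer_instance
def pvWitness_begin : String := "aab"

def Spec_begin (str : String) (out : Int) : Prop := out = begin_alt str
instance (str : String) (out : Int) : Decidable (Spec_begin str out) := by unfold Spec_begin; infer_instance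

-- ===== CLAIM (what is proved, stated in full; the proofs are below) =====
def Claim_equal_begin : Prop := ∀ (str : String), Dom_begin str → Pre_begin str → Spec_begin str (begin str)

-- ===== LEMMAS AND PROOFS =====
theorem beginLoopA_eq (cs : List Char) (letc : Char) (k : Int) :
    beginLoopA cs letc k = k + ((cs.takeWhile (· == letc)).length : Int) := by
  induction cs generalizing k with
  | nil => simp [beginLoopA]
  | cons c rest ih =>
    by_cases h : c = letc
    · simp [beginLoopA, h, ih]; ring
    · simp [beginLoopA, h]

theorem takeWhile_dropWhile_len (cs : List Char) (p : Char → Bool) :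
    ((cs.takeWhile p).length : Int) = (cs.length : Int) - ((cs.dropWhile p).length : Int) := by
  have h : (cs.takeWhile p).length + (cs.dropWhile p).length = cs.length := by
    rw [← List.length_append, List.takeWhile_append_dropWhile]
  omega

-- ===== VERDICT (by name: the statement is the Claim_ definition above) =====
theorem begin_spec : Claim_equal_begin := by
  intro str _ _
  unfold Spec_begin begin begin_alt
  cases h : PySem.Str.pyGet? str (-1) with
  | none => rfl
  | some letc =>
    dsimp only
    rw [beginLoopA_eq, takeWhile_dropWhile_len]
    ring
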